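-- pv_equiv track=rewrite | github.com/shouc/digfuzz | qsym_ce.py | __find_last_cmp_pc
-- ===== SOURCE A (Python) =====
-- def __find_last_cmp_pc(cmp_constraints: dict, pc_wanted_range, nth=0):
--     result = []
--     for pc in cmp_constraints:
--         if pc_wanted_range[0] < pc < pc_wanted_range[1]:
--             if nth == 0:
--                 result.append(pc)
--             nth -= 1
--     return result
-- ===== SOURCE B (Python) =====
-- def __find_last_cmp_pc(cmp_constraints: dict, pc_wanted_range, nth=0):
--     lo, hi = pc_wanted_range[0], pc_wanted_range[1]
--     in_range = [pc for pc in cmp_constraints if lo < pc < hi]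
--     return [in_range[nth]] if 0 <= nth < len(in_range) else []
-- ===== Notes on version B (the rewrite author's own statement) =====
-- stated objective: simpler
-- what changed: Replaces the running down-counter with a conditional append inside the loop by a two-phase filter-then-index: build the in-range key list once, then select element nth with an explicit bounds guard.
import Mathlib
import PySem

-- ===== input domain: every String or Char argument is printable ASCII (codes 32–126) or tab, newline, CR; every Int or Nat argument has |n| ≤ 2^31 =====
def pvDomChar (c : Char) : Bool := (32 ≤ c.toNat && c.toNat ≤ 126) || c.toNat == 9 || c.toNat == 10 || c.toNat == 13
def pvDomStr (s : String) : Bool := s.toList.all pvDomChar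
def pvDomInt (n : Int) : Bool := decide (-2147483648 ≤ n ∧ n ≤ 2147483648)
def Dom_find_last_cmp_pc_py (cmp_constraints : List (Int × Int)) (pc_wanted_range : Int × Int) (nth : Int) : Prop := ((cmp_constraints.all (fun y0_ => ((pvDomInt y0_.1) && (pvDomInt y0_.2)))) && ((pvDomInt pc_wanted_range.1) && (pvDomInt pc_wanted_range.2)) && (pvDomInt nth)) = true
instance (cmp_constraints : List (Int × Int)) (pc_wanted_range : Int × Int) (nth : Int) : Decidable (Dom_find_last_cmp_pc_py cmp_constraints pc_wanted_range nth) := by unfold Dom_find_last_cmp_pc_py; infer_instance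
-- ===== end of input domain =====

-- B replaces A's down-counter loop with filter-then-index (objective: simpler).

-- ===== PORT A =====
-- loop state: (result, nth); iterates the dict's keys in insertion order
def find_last_cmp_pc_py (cmp_constraints : List (Int × Int)) (pc_wanted_range : Int × Int) (nth : Int) : List Int :=
  ((PySem.Dict.ofList cmp_constraints).keys.foldl
    (fun st pc =>
      if pc_wanted_range.1 < pc ∧ pc < pc_wanted_range.2 then
        ((if st.2 = 0 then st.1 ++ [pc] else st.1), st.2 - 1)
      else st)
    (([] : List Int), nth)).1

-- ===== PORT B =====
def find_last_cmp_pc_py_alt (cmp_constraints : List (Int × Int)) (pc_wanted_range : Int × Int) (nth : Int) : List Int :=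
  let in_range := (PySem.Dict.ofList cmp_constraints).keys.filter
    (fun pc => decide (pc_wanted_range.1 < pc) && decide (pc < pc_wanted_range.2))
  if 0 ≤ nth ∧ nth < in_range.length then [in_range.getD nth.toNat 0] else []

-- ===== PRECONDITION & SPEC =====
def Spec_find_last_cmp_pc_py (cmp_constraints : List (Int × Int)) (pc_wanted_range : Int × Int) (nth : Int) (out : List Int) : Prop := out = find_last_cmp_pc_py_alt cmp_constraints pc_wanted_range nth
instance (cmp_constraints : List (Int × Int)) (pc_wanted_range : Int × Int) (nth : Int) (out : List Int) : Decidable (Spec_find_last_cmp_pc_py cmp_constraints pc_wanted_range nth out) := by unfold Spec_find_last_cmp_pc_py; infer_instance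

-- ===== CLAIM (what is proved, stated in full; the proofs are below) =====
def Claim_equal_find_last_cmp_pc_py : Prop := ∀ (cmp_constraints : List (Int × Int)) (pc_wanted_range : Int × Int) (nth : Int), Dom_find_last_cmp_pc_py cmp_constraints pc_wanted_range nth → Spec_find_last_cmp_pc_py cmp_constraints pc_wanted_range nth (find_last_cmp_pc_py cmp_constraints pc_wanted_range nth)

-- ===== LEMMAS AND PROOFS =====

theorem find_loop_eq (lo hi : Int) (l : List Int) :
    ∀ (n : Int) (r : List Int),
    (l.foldl
      (fun st pc =>
        if lo < pc ∧ pc < hi then ((if st.2 = 0 then st.1 ++ [pc] else st.1), st.2 - 1) else st)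
      (r, n)).1 =
    r ++ (let F := l.filter (fun pc => decide (lo < pc) && decide (pc < hi));
          if 0 ≤ n ∧ n < F.length then [F.getD n.toNat 0] else []) := by
  induction l with
  | nil => intro n r; simp
  | cons pc tl ih =>
    intro n r
    by_cases hp : lo < pc ∧ pc < hi
    · simp only [List.foldl_cons, if_pos hp, List.filter_cons,
        decide_eq_true hp.1, decide_eq_true hp.2, Bool.and_self, if_pos]
      rw [ih]
      by_cases h0 : n = 0
      · subst h0
        simp only [reduceIte]
        have hneg : ¬ ((0:Int) ≤ -1 ∧ (-1:Int) < (tl.filter (fun pc => decide (lo < pc) && decide (pc < hi))).length) := by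
          intro h; omega
        exact if_neg hneg ▸ (by simp)
      · simp only [if_neg h0]
        set F := tl.filter (fun pc => decide (lo < pc) && decide (pc < hi)) with hF
        by_cases hn : 0 ≤ n - 1 ∧ n - 1 < (F.length : Int)
        · have hn' : 0 ≤ n ∧ n < ((pc :: F).length : Int) := by
            simp only [List.length_cons]; push_cast; omega
          rw [if_pos hn, if_pos hn']
          have ht : n.toNat = (n - 1).toNat + 1 := by omega
          rw [ht, List.getD_cons_succ]
        · have hn' : ¬ (0 ≤ n ∧ n < ((pc :: F).length : Int)) := by
            simp only [List.length_cons]; push_cast at *; omega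
          rw [if_neg hn, if_neg hn']
    · simp only [List.foldl_cons, if_neg hp, List.filter_cons]
      have : (decide (lo < pc) && decide (pc < hi)) = false := by
        simp only [Bool.and_eq_false_iff, decide_eq_false_iff_not]; tauto
      rw [this, ih]
      simp

-- ===== VERDICT (by name: the statement is the Claim_ definition above) =====
theorem find_last_cmp_pc_py_spec : Claim_equal_find_last_cmp_pc_py := by
  intro cs rng nth _
  unfold Spec_find_last_cmp_pc_py find_last_cmp_pc_py find_last_cmp_pc_py_alt
  rw [find_loop_eq]
  simp
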